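-- pv_equiv track=rewrite | github.com/donnchacarroll/chicago-spending-investigation | backend/analysis/categories.py | classify_dv_vendor
-- ===== SOURCE A (Python) =====
-- DV_VENDOR_RULES = [
--     ("Pensions & Retirement", [
--         "%PENSION%", "%ANNUIT%", "%RETIREMENT%", "%BENEFIT FUND%",
--     ]),
--     ("Debt Service & Banking", [
--         "%BANK%", "%AMALGAMATED%", "%ZIONS%", "%TRUST CO%",
--     ]),
--     ("Government Transfers", [
--         "COOK COUNTY%", "STATE OF%", "%TRANSIT%", "DEPARTMENT OF%",
--         "%TREASURER%", "%COLLECTOR%", "CITY OF%",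
--     ]),
--     ("Legal Settlements & Fees", [
--         "%LAW%", "%ATTORNEY%", "%LEGAL%", "%LOEVY%",
--     ]),
--     ("Insurance & Risk", [
--         "%INSURANCE%", "%CLAIMS%", "%SEDGWICK%", "%RISK%",
--     ]),
--     ("Utilities", [
--         "%COMED%", "%COMMONWEALTH EDISON%", "%PEOPLES GAS%",
--         "%NICOR%", "%WATER%RECLAMATION%",
--     ]),
--     ("Payroll & Benefits", [
--         "%PATROLMEN%", "%FIREMANS ASSN%", "%NATIONWIDE RETIREMENT%",
--         "%DEFERRED COMP%", "%UNION%", "%CREDIT UNION%",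
--     ]),
-- ]
--
-- def classify_dv_vendor(vendor_name: str) -> str:
--     """Classify a direct voucher vendor into a subcategory."""
--     upper = vendor_name.upper()
--     for category, patterns in DV_VENDOR_RULES:
--         for pat in patterns:
--             pat_clean = pat.replace("%", "")
--             if pat.startswith("%") and pat.endswith("%"):
--                 if pat_clean in upper:
--                     return category
--             elif pat.startswith("%"):
--                 if upper.endswith(pat_clean):
--                     return category
--             elif pat.endswith("%"):
--                 if upper.startswith(pat_clean):
--                     return category
--             else:
--                 if upper == pat_clean:
--                     return category
--     # Check if it looks like a person's name (LAST, FIRST pattern)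
--     if ", " in vendor_name and not any(
--         kw in upper for kw in ["LLC", "INC", "CORP", "LTD", "CO.", "COMPANY", "SERVICES", "GROUP"]
--     ):
--         return "Individual Payments"
--     return "Other Direct Voucher"
-- ===== SOURCE B (Python) =====
-- import re
--
-- DV_VENDOR_RULES = [
--     ("Pensions & Retirement", [
--         "%PENSION%", "%ANNUIT%", "%RETIREMENT%", "%BENEFIT FUND%",
--     ]),
--     ("Debt Service & Banking", [
--         "%BANK%", "%AMALGAMATED%", "%ZIONS%", "%TRUST CO%",
--     ]),
--     ("Government Transfers", [
--         "COOK COUNTY%", "STATE OF%", "%TRANSIT%", "DEPARTMENT OF%",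
--         "%TREASURER%", "%COLLECTOR%", "CITY OF%",
--     ]),
--     ("Legal Settlements & Fees", [
--         "%LAW%", "%ATTORNEY%", "%LEGAL%", "%LOEVY%",
--     ]),
--     ("Insurance & Risk", [
--         "%INSURANCE%", "%CLAIMS%", "%SEDGWICK%", "%RISK%",
--     ]),
--     ("Utilities", [
--         "%COMED%", "%COMMONWEALTH EDISON%", "%PEOPLES GAS%",
--         "%NICOR%", "%WATER%RECLAMATION%",
--     ]),
--     ("Payroll & Benefits", [
--         "%PATROLMEN%", "%FIREMANS ASSN%", "%NATIONWIDE RETIREMENT%",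
--         "%DEFERRED COMP%", "%UNION%", "%CREDIT UNION%",
--     ]),
-- ]
--
--
-- def _regex_for(pat):
--     """Turn one '%'-pattern into an anchored regex fragment over the escaped literal."""
--     body = re.escape(pat.replace("%", ""))
--     lead, trail = pat.startswith("%"), pat.endswith("%")
--     if lead and trail:
--         return body            # substring
--     if lead:
--         return body + r"\Z"    # suffix
--     if trail:
--         return "^" + body      # prefix
--     return "^" + body + r"\Z"  # exact
--
--
-- # One compiled regex per category: the alternation of its patterns' fragments.
-- _COMPILED = [(category, re.compile("|".join(_regex_for(p) for p in patterns)))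
--              for category, patterns in DV_VENDOR_RULES]
--
-- _ORG_RE = re.compile("|".join(re.escape(kw) for kw in
--                               ["LLC", "INC", "CORP", "LTD", "CO.", "COMPANY", "SERVICES", "GROUP"]))
--
--
-- def classify_dv_vendor(vendor_name: str) -> str:
--     """Classify a direct voucher vendor into a subcategory."""
--     upper = vendor_name.upper()
--     for category, rx in _COMPILED:
--         if rx.search(upper):
--             return category
--     if ", " in vendor_name and not _ORG_RE.search(upper):
--         return "Individual Payments"
--     return "Other Direct Voucher"
-- ===== Notes on version B (the rewrite author's own statement) =====
-- stated objective: idiomatic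
-- what changed: The per-call nested loop that re-parses each percent-wildcard pattern with string-method checks is replaced by a one-time compilation of every category's patterns into a single anchored-escaped-literal regex (alternation), so the call is one regex search per category plus a regex for the organisation-keyword fallback.
import Mathlib
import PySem

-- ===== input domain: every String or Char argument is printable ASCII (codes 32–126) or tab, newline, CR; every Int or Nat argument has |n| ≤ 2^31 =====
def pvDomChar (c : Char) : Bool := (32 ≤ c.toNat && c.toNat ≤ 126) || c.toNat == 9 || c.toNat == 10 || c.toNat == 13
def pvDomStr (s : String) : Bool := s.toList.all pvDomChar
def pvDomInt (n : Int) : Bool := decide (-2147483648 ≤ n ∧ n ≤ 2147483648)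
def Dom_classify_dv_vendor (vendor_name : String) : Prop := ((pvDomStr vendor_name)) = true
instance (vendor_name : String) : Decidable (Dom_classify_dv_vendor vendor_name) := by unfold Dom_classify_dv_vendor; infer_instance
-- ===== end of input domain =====

-- B compiles each category's '%'-patterns once into one anchored-escaped-literal regex and searches those per call (idiomatic; no speed claim).

-- ===== PORT A =====
def dvVendorRules : List (String × List String) := [
  ("Pensions & Retirement", ["%PENSION%", "%ANNUIT%", "%RETIREMENT%", "%BENEFIT FUND%"]),
  ("Debt Service & Banking", ["%BANK%", "%AMALGAMATED%", "%ZIONS%", "%TRUST CO%"]),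
  ("Government Transfers", ["COOK COUNTY%", "STATE OF%", "%TRANSIT%", "DEPARTMENT OF%",
        "%TREASURER%", "%COLLECTOR%", "CITY OF%"]),
  ("Legal Settlements & Fees", ["%LAW%", "%ATTORNEY%", "%LEGAL%", "%LOEVY%"]),
  ("Insurance & Risk", ["%INSURANCE%", "%CLAIMS%", "%SEDGWICK%", "%RISK%"]),
  ("Utilities", ["%COMED%", "%COMMONWEALTH EDISON%", "%PEOPLES GAS%",
        "%NICOR%", "%WATER%RECLAMATION%"]),
  ("Payroll & Benefits", ["%PATROLMEN%", "%FIREMANS ASSN%", "%NATIONWIDE RETIREMENT%",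
        "%DEFERRED COMP%", "%UNION%", "%CREDIT UNION%"])]

def dvNameKws : List String := ["LLC", "INC", "CORP", "LTD", "CO.", "COMPANY", "SERVICES", "GROUP"]

-- A's inner 'for pat in patterns' with early return (none = fell through)
def aInner (upper category : String) : List String → Option String
  | [] => none
  | pat :: rest =>
      let patClean := PySem.Str.replace pat "%" ""
      if PySem.Str.startswith pat "%" && PySem.Str.endswith pat "%" then
        if PySem.Str.isIn patClean upper then some category else aInner upper category rest
      else if PySem.Str.startswith pat "%" then
        if PySem.Str.endswith upper patClean then some category else aInner upper category rest
      else if PySem.Str.endswith pat "%" then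
        if PySem.Str.startswith upper patClean then some category else aInner upper category rest
      else
        if upper == patClean then some category else aInner upper category rest

-- A's outer 'for category, patterns in DV_VENDOR_RULES'
def aOuter (upper : String) : List (String × List String) → Option String
  | [] => none
  | (category, patterns) :: rest =>
      match aInner upper category patterns with
      | some c => some c
      | none => aOuter upper rest

def classify_dv_vendor (vendor_name : String) : String :=
  let upper := PySem.Str.upper vendor_name
  match aOuter upper dvVendorRules with
  | some c => c
  | none =>
    if PySem.Str.isIn ", " vendor_name &&
        !(dvNameKws.any fun kw => PySem.Str.isIn kw upper) then "Individual Payments"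
    else "Other Direct Voucher"

-- ===== PORT B =====
-- _regex_for: the compiled fragment '^'?<escaped body>'\Z'? is represented by its data
-- (anchoredStart, anchoredEnd, body); this models re exactly for these escaped-literal fragments.
def bRegexFor (pat : String) : Bool × Bool × String :=
  let body := PySem.Str.replace pat "%" ""
  let lead := PySem.Str.startswith pat "%"
  let trail := PySem.Str.endswith pat "%"
  if lead && trail then (false, false, body)
  else if lead then (false, true, body)
  else if trail then (true, false, body)
  else (true, true, body)

-- _COMPILED: one alternation (list of fragments) per category
def bCompiled : List (String × List (Bool × Bool × String)) :=
  dvVendorRules.map (fun cp => (cp.1, cp.2.map bRegexFor))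

-- _ORG_RE: alternation of the escaped organisation keywords (all unanchored)
def bOrgRe : List (Bool × Bool × String) :=
  dvNameKws.map (fun kw => (false, false, kw))

-- re.search of one anchored-escaped-literal fragment on upper (exact model:
-- ^lit\Z = equality, ^lit = prefix, lit\Z = suffix, lit = substring)
def bMatch (upper : String) : Bool × Bool × String → Bool
  | (false, false, body) => PySem.Str.isIn body upper
  | (false, true, body) => PySem.Str.endswith upper body
  | (true, false, body) => PySem.Str.startswith upper body
  | (true, true, body) => upper == body

-- rx.search(upper) for an alternation: some fragment matches
def bSearch (upper : String) (rx : List (Bool × Bool × String)) : Bool :=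
  rx.any (bMatch upper)

-- B's 'for category, rx in _COMPILED'
def bLoop (upper : String) : List (String × List (Bool × Bool × String)) → Option String
  | [] => none
  | (category, rx) :: rest =>
      if bSearch upper rx then some category else bLoop upper rest

def classify_dv_vendor_alt (vendor_name : String) : String :=
  let upper := PySem.Str.upper vendor_name
  match bLoop upper bCompiled with
  | some c => c
  | none =>
    if PySem.Str.isIn ", " vendor_name && !(bSearch upper bOrgRe) then "Individual Payments"
    else "Other Direct Voucher"

-- ===== PRECONDITION & SPEC =====
def Spec_classify_dv_vendor (vendor_name : String) (out : String) : Prop := out = classify_dv_vendor_alt vendor_name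
instance (vendor_name : String) (out : String) : Decidable (Spec_classify_dv_vendor vendor_name out) := by unfold Spec_classify_dv_vendor; infer_instance

-- ===== CLAIM (what is proved, stated in full; the proofs are below) =====
def Claim_equal_classify_dv_vendor : Prop := ∀ (vendor_name : String), Dom_classify_dv_vendor vendor_name → Spec_classify_dv_vendor vendor_name (classify_dv_vendor vendor_name)

-- ===== LEMMAS AND PROOFS =====

-- the boolean test A applies to one pattern
def aCheck (upper pat : String) : Bool :=
  let patClean := PySem.Str.replace pat "%" ""
  if PySem.Str.startswith pat "%" && PySem.Str.endswith pat "%" then PySem.Str.isIn patClean upper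
  else if PySem.Str.startswith pat "%" then PySem.Str.endswith upper patClean
  else if PySem.Str.endswith pat "%" then PySem.Str.startswith upper patClean
  else upper == patClean

theorem aInner_cons (upper category pat : String) (rest : List String) :
    aInner upper category (pat :: rest)
      = if aCheck upper pat then some category else aInner upper category rest := by
  cases hl : PySem.Chars.startswith pat.toList ['%'] <;>
    cases ht : PySem.Chars.endswith pat.toList ['%'] <;>
      simp [aInner, aCheck, hl, ht]

theorem aInner_eq (upper category : String) (pats : List String) :
    aInner upper category pats = if pats.any (aCheck upper) then some category else none := by
  induction pats with
  | nil => rfl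
  | cons pat rest ih =>
      rw [aInner_cons, ih]
      cases h : aCheck upper pat <;> simp [h, List.any_cons]

theorem bMatch_regexFor (upper pat : String) :
    bMatch upper (bRegexFor pat) = aCheck upper pat := by
  cases hl : PySem.Chars.startswith pat.toList ['%'] <;>
    cases ht : PySem.Chars.endswith pat.toList ['%'] <;>
      simp [bMatch, bRegexFor, aCheck, hl, ht]

theorem bSearch_map (upper : String) (pats : List String) :
    bSearch upper (pats.map bRegexFor) = pats.any (aCheck upper) := by
  induction pats with
  | nil => rfl
  | cons pat rest ih =>
      simp only [List.map_cons, bSearch, List.any_cons, bMatch_regexFor] at *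
      rw [ih]

theorem loops_eq (upper : String) (rules : List (String × List String)) :
    bLoop upper (rules.map fun cp => (cp.1, cp.2.map bRegexFor)) = aOuter upper rules := by
  induction rules with
  | nil => rfl
  | cons cp rest ih =>
      obtain ⟨category, pats⟩ := cp
      simp only [List.map_cons, bLoop, aOuter, bSearch_map, aInner_eq]
      split_ifs <;> simp [ih]

theorem orgre_eq (upper : String) :
    bSearch upper bOrgRe = (dvNameKws.any fun kw => PySem.Str.isIn kw upper) := by
  simp [bSearch, bOrgRe, dvNameKws, bMatch, List.any_cons]

-- ===== VERDICT (by name: the statement is the Claim_ definition above) =====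
theorem classify_dv_vendor_spec : Claim_equal_classify_dv_vendor := by
  intro vendor_name _
  unfold Spec_classify_dv_vendor classify_dv_vendor classify_dv_vendor_alt bCompiled
  simp only [loops_eq, orgre_eq]
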